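-- pv_equiv track=rewrite | github.com/ArmEmami2001/CPU-Scheduling-Algorithm | Non-Preemptive/RR.py | merge_idle
-- ===== SOURCE A (Python) =====
-- from typing import List, Tuple, Dict, Optional
--
-- Schedule = List[Tuple[str, int, int]]  # (pid, start, end)
--
-- def merge_idle(schedule: Schedule) -> Schedule:
--     out: Schedule = []
--     for pid, s, e in schedule:
--         if out and pid == "IDLE" and out[-1][0] == "IDLE":
--             out[-1] = ("IDLE", out[-1][1], e)
--         else:
--             out.append((pid, s, e))
--     return out
-- ===== SOURCE B (Python) =====
-- from itertools import groupby
-- from typing import List, Tuple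
--
-- Schedule = List[Tuple[str, int, int]]
--
--
-- def merge_idle(schedule: Schedule) -> Schedule:
--     out: Schedule = []
--     for is_idle, grp in groupby(schedule, key=lambda seg: seg[0] == "IDLE"):
--         run = list(grp)
--         if is_idle:
--             out.append(("IDLE", run[0][1], run[-1][2]))
--         else:
--             out.extend(run)
--     return out
-- ===== Notes on version B (the rewrite author's own statement) =====
-- stated objective: idiomatic
-- what changed: B splits the schedule into maximal consecutive runs with itertools.groupby keyed on (pid == 'IDLE') and emits each idle run as one tuple (first start, last end), instead of A's accumulator loop that rewrites the last appended element.
import Mathlib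
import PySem

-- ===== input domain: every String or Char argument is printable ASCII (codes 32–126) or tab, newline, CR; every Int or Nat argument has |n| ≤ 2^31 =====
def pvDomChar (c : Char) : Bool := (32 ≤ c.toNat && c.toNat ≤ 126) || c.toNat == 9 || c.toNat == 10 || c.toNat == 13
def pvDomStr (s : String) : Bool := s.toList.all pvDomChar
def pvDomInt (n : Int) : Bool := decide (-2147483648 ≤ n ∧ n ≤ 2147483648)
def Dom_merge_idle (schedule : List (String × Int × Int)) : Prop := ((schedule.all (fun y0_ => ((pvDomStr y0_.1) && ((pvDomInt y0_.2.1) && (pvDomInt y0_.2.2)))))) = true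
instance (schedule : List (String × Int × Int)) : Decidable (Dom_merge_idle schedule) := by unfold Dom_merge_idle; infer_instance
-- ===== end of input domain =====

-- B replaces A's accumulator loop (which rewrites the last appended element) by a run-grouping
-- pass (itertools.groupby on pid == "IDLE"), emitting each idle run as one merged tuple: idiomatic.

-- ===== PORT A =====
-- one iteration of A's loop: out is the accumulator, seg the current (pid, s, e)
def mergeIdleStepA (out : List (String × Int × Int)) (seg : String × Int × Int) :
    List (String × Int × Int) :=
  match out.getLast? with
  | some t =>
      if seg.1 == "IDLE" && t.1 == "IDLE" then
        out.dropLast ++ [("IDLE", t.2.1, seg.2.2)]   -- out[-1] = ("IDLE", out[-1][1], e)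
      else out ++ [seg]
  | none => out ++ [seg]

def merge_idle (schedule : List (String × Int × Int)) : List (String × Int × Int) :=
  schedule.foldl mergeIdleStepA []

-- ===== PORT B =====
-- groupby: take the maximal run sharing the head's key (pid == "IDLE"), emit it, recurse on the rest
def merge_idle_alt : List (String × Int × Int) → List (String × Int × Int)
  | [] => []
  | x :: rest =>
      let k := x.1 == "IDLE"
      let run := x :: rest.takeWhile (fun y => (y.1 == "IDLE") == k)
      let tl := rest.dropWhile (fun y => (y.1 == "IDLE") == k)
      (if k then [("IDLE", x.2.1, ((rest.takeWhile (fun y => (y.1 == "IDLE") == k)).getLastD x).2.2)]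
       else run) ++ merge_idle_alt tl
termination_by l => l.length
decreasing_by
  simp only [List.length_cons]
  exact Nat.lt_succ_of_le (List.length_dropWhile_le _ _)

-- ===== PRECONDITION & SPEC =====
def Spec_merge_idle (schedule : List (String × Int × Int)) (out : List (String × Int × Int)) : Prop := out = merge_idle_alt schedule
instance (schedule : List (String × Int × Int)) (out : List (String × Int × Int)) : Decidable (Spec_merge_idle schedule out) := by unfold Spec_merge_idle; infer_instance

-- ===== CLAIM (what is proved, stated in full; the proofs are below) =====
def Claim_equal_merge_idle : Prop := ∀ (schedule : List (String × Int × Int)), Dom_merge_idle schedule → Spec_merge_idle schedule (merge_idle schedule)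

-- ===== LEMMAS AND PROOFS =====

-- only the last element of the accumulator matters to A's loop
theorem foldl_stepA_shift (xs : List (String × Int × Int))
    (acc : List (String × Int × Int)) (t : String × Int × Int) :
    List.foldl mergeIdleStepA (acc ++ [t]) xs = acc ++ List.foldl mergeIdleStepA [t] xs := by
  induction xs generalizing acc t with
  | nil => simp
  | cons x xs ih =>
      simp only [List.foldl_cons]
      by_cases h : (x.1 == "IDLE" && t.1 == "IDLE") = true
      · have e1 : mergeIdleStepA (acc ++ [t]) x = acc ++ [("IDLE", t.2.1, x.2.2)] := by
          simp [mergeIdleStepA, h]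
        have e2 : mergeIdleStepA [t] x = [("IDLE", t.2.1, x.2.2)] := by
          simp [mergeIdleStepA, h]
        rw [e1, e2, ih]
      · have e1 : mergeIdleStepA (acc ++ [t]) x = (acc ++ [t]) ++ [x] := by
          simp [mergeIdleStepA, h]
        have e2 : mergeIdleStepA [t] x = [t] ++ [x] := by
          simp [mergeIdleStepA, h]
        rw [e1, e2, ih, ih, List.append_assoc]

-- B on two leading segments that do NOT both have pid "IDLE": head emitted as itself
theorem alt_cons (t p : String × Int × Int) (xs : List (String × Int × Int))
    (h : (p.1 == "IDLE" && t.1 == "IDLE") = false) :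
    merge_idle_alt (t :: p :: xs) = t :: merge_idle_alt (p :: xs) := by
  rw [Bool.and_eq_false_iff] at h
  by_cases ht : (t.1 == "IDLE") = true
  · -- t idle, so p not idle: keys differ, run = [t], and the merged single tuple equals t
    have hp : (p.1 == "IDLE") = false := by
      cases h with
      | inl h => exact h
      | inr h => simp [ht] at h
    have htv : t.1 = "IDLE" := by simpa using ht
    conv_lhs => rw [merge_idle_alt]
    simp only [ht, hp, List.takeWhile_cons, List.dropWhile_cons]
    simp [← htv]
  · -- t not idle: run starts with t; whether p joins the run or not the head stays t
    simp only [Bool.not_eq_true] at ht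
    by_cases hp : (p.1 == "IDLE") = true
    · conv_lhs => rw [merge_idle_alt]
      simp only [ht, List.takeWhile_cons, List.dropWhile_cons, hp]
      simp
    · simp only [Bool.not_eq_true] at hp
      conv_lhs => rw [merge_idle_alt]
      conv_rhs => rw [merge_idle_alt]
      simp [ht, hp]

-- B merges two leading IDLE segments the same way A's accumulator update does
theorem alt_merge (t p : String × Int × Int) (xs : List (String × Int × Int))
    (ht : (t.1 == "IDLE") = true) (hp : (p.1 == "IDLE") = true) :
    merge_idle_alt (t :: p :: xs) = merge_idle_alt (("IDLE", t.2.1, p.2.2) :: xs) := by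
  conv_lhs => rw [merge_idle_alt]
  conv_rhs => rw [merge_idle_alt]
  simp only [ht, List.takeWhile_cons, List.dropWhile_cons, hp]
  simp only [beq_self_eq_true, if_true, List.getLastD_cons]
  cases hxs : xs.takeWhile (fun y => (y.1 == "IDLE") == true) with
  | nil => simp
  | cons a l =>
      cases e : (a :: l).getLast? with
      | none => simp at e
      | some y => simp [List.getLastD]

theorem alt_nil : merge_idle_alt [] = [] := by rw [merge_idle_alt]

-- A's loop started from a one-element accumulator equals B on the cons list
theorem foldl_stepA_alt (xs : List (String × Int × Int)) (t : String × Int × Int) :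
    List.foldl mergeIdleStepA [t] xs = merge_idle_alt (t :: xs) := by
  induction xs generalizing t with
  | nil =>
      rw [merge_idle_alt]
      by_cases ht : (t.1 == "IDLE") = true
      · have htv : t.1 = "IDLE" := by simpa using ht
        simp [alt_nil, ← htv]
      · simp only [Bool.not_eq_true] at ht
        simp [alt_nil, ht]
  | cons p xs ih =>
      simp only [List.foldl_cons]
      by_cases h : (p.1 == "IDLE" && t.1 == "IDLE") = true
      · rw [Bool.and_eq_true] at h
        have e : mergeIdleStepA [t] p = [("IDLE", t.2.1, p.2.2)] := by
          simp [mergeIdleStepA, h.1, h.2]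
        rw [e, ih, alt_merge t p xs h.2 h.1]
      · simp only [Bool.not_eq_true] at h
        have e : mergeIdleStepA [t] p = [t] ++ [p] := by
          simp [mergeIdleStepA, h]
        rw [e, foldl_stepA_shift, ih, alt_cons t p xs h]
        simp

-- ===== VERDICT (by name: the statement is the Claim_ definition above) =====
theorem merge_idle_spec : Claim_equal_merge_idle := by
  intro schedule _
  unfold Spec_merge_idle merge_idle
  cases schedule with
  | nil => rw [merge_idle_alt]; rfl
  | cons x xs =>
      have e : mergeIdleStepA [] x = [x] := by simp [mergeIdleStepA]
      simp only [List.foldl_cons, e]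
      exact foldl_stepA_alt xs x
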